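-- pv_equiv track=rewrite | github.com/pypi-data/pypi-mirror-399 | packages/onfire/onfire-0.1.1.tar.gz/onfire-0.1.1/termsite/onfire.py | _build_char_lut
-- ===== SOURCE A (Python) =====
-- from typing import List, Sequence, Tuple
--
-- def _build_char_lut(chars: Sequence[str], scale_x: int) -> list[str]:
--     """Map intensity 0..255 -> rendered string (character tiled scale_x times)."""
--     if not chars:
--         chars = (" ",)
--     n = len(chars)
--     tile = max(1, int(scale_x))
--
--     if n == 2:
--         lut = [""] * 256
--         off = chars[0] * tile
--         on = chars[1] * tile
--         for i in range(256):
--             lut[i] = on if i >= 80 else off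
--         return lut
--
--     lut = [""] * 256
--     max_i = n - 1
--     for i in range(256):
--         idx = (i * max_i) // 255
--         lut[i] = chars[idx] * tile
--     return lut
-- ===== SOURCE B (Python) =====
-- def _build_char_lut(chars, scale_x):
--     """Map intensity 0..255 -> rendered string (character tiled scale_x times)."""
--     if not chars:
--         chars = (" ",)
--     n = len(chars)
--     tile = max(1, int(scale_x))
--
--     if n == 2:
--         return [chars[0] * tile] * 80 + [chars[1] * tile] * 176
--
--     max_i = n - 1
--     if max_i == 0:
--         return [chars[0] * tile] * 256
--
--     # Fill the table band by band: all intensities i with the same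
--     # (i * max_i) // 255 share one rendered string.
--     lut = []
--     i = 0
--     while i < 256:
--         idx = (i * max_i) // 255
--         end = min(256, -(-(255 * (idx + 1)) // max_i))  # first i' with a larger idx
--         lut.extend([chars[idx] * tile] * (end - i))
--         i = end
--     return lut
-- ===== Notes on version B (the rewrite author's own statement) =====
-- stated objective: alternative
-- what changed: B fills the 256-entry LUT band by band with a while loop (computing each character's contiguous intensity range via ceiling division and extending the list with a replicated run, plus direct replicate constructions for the n==2 and single-char cases) instead of A's per-intensity loop that computes an index for each of the 256 entries.
import Mathlib
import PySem

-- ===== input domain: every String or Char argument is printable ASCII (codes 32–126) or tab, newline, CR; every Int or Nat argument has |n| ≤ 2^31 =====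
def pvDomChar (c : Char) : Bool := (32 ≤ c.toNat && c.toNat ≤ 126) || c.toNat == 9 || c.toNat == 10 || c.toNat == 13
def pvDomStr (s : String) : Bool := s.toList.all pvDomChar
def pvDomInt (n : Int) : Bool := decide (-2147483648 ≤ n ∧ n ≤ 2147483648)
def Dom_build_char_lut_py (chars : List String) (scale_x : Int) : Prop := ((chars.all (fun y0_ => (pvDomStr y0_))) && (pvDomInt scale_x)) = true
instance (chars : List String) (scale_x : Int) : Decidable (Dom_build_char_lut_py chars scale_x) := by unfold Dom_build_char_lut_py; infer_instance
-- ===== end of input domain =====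

-- B fills the 256-entry table band by band (one contiguous run of equal entries at a time)
-- instead of computing the character index separately for each of the 256 intensities;
-- objective: alternative decomposition, same exact output.

-- Python's 's * k' on a string, exact (k ≤ 0 gives ""); shared primitive helper of both ports.
def pyStrMul (s : String) (k : Int) : String := String.ofList (PySem.List.pyRepeat s.toList k)

-- ===== PORT A =====
def build_char_lut_py (chars : List String) (scale_x : Int) : List String :=
  let chars := if chars = [] then [" "] else chars
  let n : Int := chars.length
  let tile : Int := max 1 scale_x
  if n = 2 then
    let lut : List String := List.replicate 256 ""
    let off := pyStrMul (PySem.List.pyGetD chars 0 "") tile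
    let onv := pyStrMul (PySem.List.pyGetD chars 1 "") tile
    (PySem.List.pyRange 0 256 1).foldl
      (fun lut i => PySem.List.pySetD lut i (if 80 ≤ i then onv else off)) lut
  else
    let lut : List String := List.replicate 256 ""
    let max_i := n - 1
    (PySem.List.pyRange 0 256 1).foldl
      (fun lut i =>
        let idx := PySem.Int.floordiv (i * max_i) 255
        PySem.List.pySetD lut i (pyStrMul (PySem.List.pyGetD chars idx "") tile)) lut

-- ===== PORT B =====
-- termination fact for B's while loop: the band end is strictly beyond i
theorem pvBandEnd_gt (max_i i : Int) (hm : 0 < max_i) :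
    i < -(PySem.Int.floordiv (-(255 * (PySem.Int.floordiv (i * max_i) 255 + 1))) max_i) := by
  set idx := PySem.Int.floordiv (i * max_i) 255 with hidx
  set c := -(PySem.Int.floordiv (-(255 * (idx + 1))) max_i) with hc
  have h1 : idx * 255 ≤ i * max_i ∧ i * max_i < (idx + 1) * 255 :=
    (PySem.Int.floordiv_eq_iff_of_pos (by omega)).mp hidx.symm
  have h2 : (c - 1) * max_i < 255 * (idx + 1) ∧ 255 * (idx + 1) ≤ c * max_i :=
    (PySem.Int.neg_floordiv_neg_eq_iff_of_pos (by omega)).mp hc.symm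
  by_contra h
  have hci : c ≤ i := by omega
  have : c * max_i ≤ i * max_i := mul_le_mul_of_nonneg_right hci (by omega)
  nlinarith [h1.2, h2.2]

-- B's while loop: emit one band `[chars[idx] * tile] * (end - i)`, continue at its end
-- (the `0 < max_i` guard only makes the recursion total; B calls it with max_i ≥ 1)
def bloop (chars : List String) (tile max_i i : Int) : List String :=
  if h : 0 < max_i ∧ i < 256 then
    let idx := PySem.Int.floordiv (i * max_i) 255
    let e := min 256 (-(PySem.Int.floordiv (-(255 * (idx + 1))) max_i))
    PySem.List.pyRepeat [pyStrMul (PySem.List.pyGetD chars idx "") tile] (e - i) ++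
      bloop chars tile max_i e
  else []
termination_by (256 - i).toNat
decreasing_by
  have := pvBandEnd_gt max_i i h.1
  omega

def build_char_lut_py_alt (chars : List String) (scale_x : Int) : List String :=
  let chars := if chars = [] then [" "] else chars
  let n : Int := chars.length
  let tile : Int := max 1 scale_x
  if n = 2 then
    PySem.List.pyRepeat [pyStrMul (PySem.List.pyGetD chars 0 "") tile] 80 ++
      PySem.List.pyRepeat [pyStrMul (PySem.List.pyGetD chars 1 "") tile] 176
  else
    let max_i := n - 1
    if max_i = 0 then
      PySem.List.pyRepeat [pyStrMul (PySem.List.pyGetD chars 0 "") tile] 256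
    else
      bloop chars tile max_i 0

-- ===== PRECONDITION & SPEC =====
def Spec_build_char_lut_py (chars : List String) (scale_x : Int) (out : List String) : Prop := out = build_char_lut_py_alt chars scale_x
instance (chars : List String) (scale_x : Int) (out : List String) : Decidable (Spec_build_char_lut_py chars scale_x out) := by unfold Spec_build_char_lut_py; infer_instance

-- ===== CLAIM (what is proved, stated in full; the proofs are below) =====
def Claim_equal_build_char_lut_py : Prop := ∀ (chars : List String) (scale_x : Int), Dom_build_char_lut_py chars scale_x → Spec_build_char_lut_py chars scale_x (build_char_lut_py chars scale_x)

-- ===== LEMMAS AND PROOFS =====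

-- setting every index of a list (of the right length) over range' is map
theorem fill_set {α : Type} (g : Nat → α) :
    ∀ (n s : Nat) (pre l : List α), pre.length = s → l.length = n →
    (List.range' s n).foldl (fun acc k => acc.set k (g k)) (pre ++ l) =
      pre ++ (List.range' s n).map g := by
  intro n
  induction n with
  | zero =>
    intro s pre l _ hl
    simp [List.eq_nil_of_length_eq_zero hl]
  | succ m ih =>
    intro s pre l hp hl
    cases l with
    | nil => simp at hl
    | cons x t =>
      rw [List.range'_succ]
      simp only [List.foldl_cons, List.map_cons]
      have hset : (pre ++ x :: t).set s (g s) = (pre ++ [g s]) ++ t := by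
        rw [← hp, List.set_append_right _ _ (le_refl _)]
        simp
      rw [hset, ih (s + 1) (pre ++ [g s]) t (by simp [hp]) (by simpa using hl)]
      simp

-- A's loop: setting every index of a fresh 256-list is mapping over the range
theorem foldA (g : Int → String) (d : String) :
    (PySem.List.pyRange 0 256 1).foldl (fun lut i => PySem.List.pySetD lut i (g i)) (List.replicate 256 d)
      = (PySem.List.pyRange 0 256 1).map g := by
  rw [PySem.List.pyRange_one]
  simp only [List.foldl_map, List.map_map]
  norm_num
  have h := fill_set (fun k : Nat => g (k : Int)) 256 0 [] (List.replicate 256 d) rfl (List.length_replicate)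
  rw [List.nil_append, List.nil_append] at h
  rw [List.range_eq_range']
  exact h

-- every j in the band [i, end) has the same character index as i
theorem band_const (max_i i j : Int) (hm : 0 < max_i) (hij : i ≤ j)
    (hj : j < -(PySem.Int.floordiv (-(255 * (PySem.Int.floordiv (i * max_i) 255 + 1))) max_i)) :
    PySem.Int.floordiv (j * max_i) 255 = PySem.Int.floordiv (i * max_i) 255 := by
  set idx := PySem.Int.floordiv (i * max_i) 255 with hidx
  set c := -(PySem.Int.floordiv (-(255 * (idx + 1))) max_i) with hc
  have h1 : idx * 255 ≤ i * max_i ∧ i * max_i < (idx + 1) * 255 :=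
    (PySem.Int.floordiv_eq_iff_of_pos (by omega)).mp hidx.symm
  have h2 : (c - 1) * max_i < 255 * (idx + 1) ∧ 255 * (idx + 1) ≤ c * max_i :=
    (PySem.Int.neg_floordiv_neg_eq_iff_of_pos (by omega)).mp hc.symm
  refine (PySem.Int.floordiv_eq_iff_of_pos (by omega)).mpr ⟨?_, ?_⟩
  · calc idx * 255 ≤ i * max_i := h1.1
      _ ≤ j * max_i := mul_le_mul_of_nonneg_right hij (by omega)
  · have hjc : j ≤ c - 1 := by omega
    have : j * max_i ≤ (c - 1) * max_i := mul_le_mul_of_nonneg_right hjc (by omega)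
    nlinarith [h2.1]

-- B's loop computes the same map, band by band
theorem bloop_eq (chars : List String) (tile max_i : Int) (hm : 0 < max_i) :
    ∀ (fuel : Nat) (i : Int), (256 - i).toNat ≤ fuel →
    bloop chars tile max_i i = (PySem.List.pyRange i 256 1).map
      (fun j => pyStrMul (PySem.List.pyGetD chars (PySem.Int.floordiv (j * max_i) 255) "") tile) := by
  intro fuel
  induction fuel with
  | zero =>
    intro i hfi
    have hi : (256 : Int) ≤ i := by omega
    rw [bloop, PySem.List.pyRange_one_eq_nil hi]
    simp [not_and_of_not_right _ (by omega : ¬ i < 256)]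
  | succ m ih =>
    intro i hfi
    by_cases hi : i < 256
    · rw [bloop, dif_pos ⟨hm, hi⟩]
      dsimp only
      set idx := PySem.Int.floordiv (i * max_i) 255 with hidx
      set c := -(PySem.Int.floordiv (-(255 * (idx + 1))) max_i) with hc
      set e := min 256 c with he
      have hie : i < e := by
        have := pvBandEnd_gt max_i i hm
        rw [← hidx, ← hc] at this
        omega
      have he256 : e ≤ 256 := by omega
      rw [ih e (by omega)]
      rw [PySem.List.pyRange_one_append i e 256 (by omega) he256, List.map_append]
      congr 1
      rw [PySem.List.pyRepeat_singleton]
      symm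
      apply List.eq_replicate_iff.mpr
      constructor
      · rw [List.length_map, PySem.List.length_pyRange_one]
      · intro b hb
        obtain ⟨j, hjmem, hjb⟩ := List.mem_map.mp hb
        obtain ⟨hij, hje⟩ := (PySem.List.mem_pyRange_one).mp hjmem
        have : PySem.Int.floordiv (j * max_i) 255 = idx := by
          rw [hidx]
          exact band_const max_i i j hm hij (by rw [← hidx, ← hc]; omega)
        rw [← hjb, this]
    · rw [bloop, dif_neg (by omega), PySem.List.pyRange_one_eq_nil (by omega)]
      simp

-- a map over a range on which the function is constant is a replicate
theorem map_const_band (f : Int → String) (a b : Int) (v : String)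
    (hv : ∀ j, a ≤ j → j < b → f j = v) :
    (PySem.List.pyRange a b 1).map f = List.replicate (b - a).toNat v := by
  apply List.eq_replicate_iff.mpr
  refine ⟨by rw [List.length_map, PySem.List.length_pyRange_one], ?_⟩
  intro x hx
  obtain ⟨j, hjmem, hjb⟩ := List.mem_map.mp hx
  obtain ⟨h1, h2⟩ := (PySem.List.mem_pyRange_one).mp hjmem
  rw [← hjb, hv j h1 h2]

-- ===== VERDICT (by name: the statement is the Claim_ definition above) =====
set_option maxRecDepth 8192 in
theorem build_char_lut_py_spec : Claim_equal_build_char_lut_py := by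
  intro chars scale_x _
  unfold Spec_build_char_lut_py build_char_lut_py build_char_lut_py_alt
  dsimp only
  set cs := if chars = [] then [" "] else chars with hcs
  have hne : cs ≠ [] := by
    rw [hcs]; split_ifs with h
    · simp
    · exact h
  have hlen0 : cs.length ≠ 0 := fun h => hne (List.length_eq_zero_iff.mp h)
  have hlen : 1 ≤ (cs.length : Int) := by omega
  by_cases h2 : (cs.length : Int) = 2
  · rw [if_pos h2, if_pos h2, foldA,
       PySem.List.pyRange_one_append 0 80 256 (by omega) (by omega), List.map_append,
       map_const_band _ 0 80 _ (fun j _ h => if_neg (by omega)),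
       map_const_band _ 80 256 _ (fun j h _ => if_pos (by omega)),
       PySem.List.pyRepeat_singleton, PySem.List.pyRepeat_singleton]
    norm_num
  · rw [if_neg h2, if_neg h2, foldA]
    by_cases hmz : (cs.length : Int) - 1 = 0
    · have hz : PySem.Int.floordiv 0 255 = 0 := by
        rw [PySem.Int.floordiv_eq_ediv_of_pos (by omega)]
        simp
      rw [if_pos hmz,
        map_const_band _ 0 256 _ (fun j _ _ => by rw [hmz, mul_zero, hz]),
        PySem.List.pyRepeat_singleton]
      norm_num
    · rw [if_neg hmz,
        bloop_eq cs (max 1 scale_x) ((cs.length : Int) - 1) (by omega) 256 0 (by norm_num)]
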